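-- pv_equiv track=rewrite | github.com/autobotbotbot11/naic-medtech | backend/apps/results/rendering.py | resolve_sex_specific_entry
-- ===== SOURCE A (Python) =====
-- def first_entry_by_field_key(groups, field_key):
--     for group in groups:
--         for entry in group["entries"]:
--             if entry.get("field_key") == field_key:
--                 return entry
--     return None
--
-- def clone_entry(entry, **updates):
--     cloned = dict(entry)
--     cloned.update(updates)
--     return cloned
--
-- def resolve_sex_specific_entry(groups, token, sex_specific_field_map, sex_value):
--     config = sex_specific_field_map.get(token)
--     if not config:
--         return first_entry_by_field_key(groups, token)
--
--     preferred_key = config.get(sex_value or "")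
--     fallback_keys = [preferred_key] if preferred_key else []
--     fallback_keys.extend(
--         field_key
--         for field_key in (config.get("female"), config.get("male"))
--         if field_key and field_key not in fallback_keys
--     )
--
--     for field_key in fallback_keys:
--         entry = first_entry_by_field_key(groups, field_key)
--         if entry:
--             return clone_entry(entry, label=config.get("label", entry["label"]))
--     return None
-- ===== SOURCE B (Python) =====
-- def resolve_sex_specific_entry(groups, token, sex_specific_field_map, sex_value):
--     config = sex_specific_field_map.get(token)
--     if not config:
--         for group in groups:
--             for entry in group["entries"]:
--                 if entry.get("field_key") == token:
--                     return entry
--         return None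
--
--     keys = []
--     preferred = config.get(sex_value or "")
--     if preferred:
--         keys.append(preferred)
--     for key in (config.get("female"), config.get("male")):
--         if key and key not in keys:
--             keys.append(key)
--     if not keys:
--         return None
--
--     # One entry-major pass: keep the earliest entry of the lowest fallback rank
--     # seen so far; rank 0 cannot be beaten, so stop there.
--     best_rank = len(keys)
--     best_entry = None
--     for group in groups:
--         for entry in group["entries"]:
--             fk = entry.get("field_key")
--             if fk in keys:
--                 rank = keys.index(fk)
--                 if rank == 0:
--                     best_rank, best_entry = 0, entry
--                     break
--                 if rank < best_rank:
--                     best_rank, best_entry = rank, entry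
--         if best_rank == 0:
--             break
--
--     if best_entry is None:
--         return None
--     cloned = dict(best_entry)
--     cloned["label"] = config.get("label", best_entry["label"])
--     return cloned
-- ===== Notes on version B (the rewrite author's own statement) =====
-- stated objective: alternative
-- what changed: B replaces A's key-major search (one full rescan of all groups per fallback key) with a single entry-major pass that tracks the earliest entry of the lowest fallback rank, stopping early only when rank 0 is found.
import Mathlib
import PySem

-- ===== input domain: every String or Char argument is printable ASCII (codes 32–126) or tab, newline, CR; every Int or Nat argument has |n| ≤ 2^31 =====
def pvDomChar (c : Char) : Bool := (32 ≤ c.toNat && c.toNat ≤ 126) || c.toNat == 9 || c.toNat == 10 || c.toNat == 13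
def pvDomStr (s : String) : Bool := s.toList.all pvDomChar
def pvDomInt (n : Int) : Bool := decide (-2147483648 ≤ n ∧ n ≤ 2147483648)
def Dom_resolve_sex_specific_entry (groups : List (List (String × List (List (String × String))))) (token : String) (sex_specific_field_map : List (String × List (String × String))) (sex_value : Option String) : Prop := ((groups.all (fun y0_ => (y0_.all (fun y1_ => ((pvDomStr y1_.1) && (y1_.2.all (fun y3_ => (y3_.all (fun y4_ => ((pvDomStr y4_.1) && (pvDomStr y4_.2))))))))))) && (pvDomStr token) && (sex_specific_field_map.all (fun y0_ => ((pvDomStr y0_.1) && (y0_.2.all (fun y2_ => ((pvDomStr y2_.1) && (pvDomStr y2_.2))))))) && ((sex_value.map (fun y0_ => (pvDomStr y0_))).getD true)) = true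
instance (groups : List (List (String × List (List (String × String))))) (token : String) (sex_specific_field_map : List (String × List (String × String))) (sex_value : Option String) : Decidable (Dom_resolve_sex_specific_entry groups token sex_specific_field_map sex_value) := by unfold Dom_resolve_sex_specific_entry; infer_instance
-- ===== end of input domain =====

-- B replaces A's key-major search (one full rescan of all groups per fallback key) with a single
-- entry-major pass tracking the earliest entry of the lowest fallback rank (alternative algorithm).

-- Python dict lookup d.get(k) on an input given as an association list (first match).
def pyGetDict {α : Type} (d : List (String × α)) (k : String) : Option α :=
  (PySem.Dict.mk d).get? k

-- ===== PORT A =====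
-- first_entry_by_field_key: scan groups, in each scan group["entries"] for the first entry
-- whose .get("field_key") equals field_key.  (group["entries"]'s KeyError is excluded by Pre_,
-- where the lookup is always some; .getD [] stands in for the raising access.)
def first_entry_by_field_key : List (List (String × List (List (String × String)))) → String → Option (List (String × String))
  | [], _ => none
  | g :: gs, k =>
    match ((pyGetDict g "entries").getD []).find? (fun e => pyGetDict e "field_key" == some k) with
    | some e => some e
    | none => first_entry_by_field_key gs k

-- clone_entry(entry, label=v): dict(entry) then overwrite/append key "label".
def clone_entry_label (e : List (String × String)) (v : String) : List (String × String) :=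
  ((PySem.Dict.mk e).insert "label" v).items

-- the final 'for field_key in fallback_keys' loop of A (entry["label"]'s KeyError excluded by Pre_)
def pvScanFallback (groups : List (List (String × List (List (String × String))))) (config : List (String × String)) : List String → Option (List (String × String))
  | [] => none
  | k :: ks =>
    match first_entry_by_field_key groups k with
    | some e =>
      if e.isEmpty then pvScanFallback groups config ks
      else some (clone_entry_label e ((pyGetDict config "label").getD ((pyGetDict e "label").getD "")))
    | none => pvScanFallback groups config ks

def resolve_sex_specific_entry (groups : List (List (String × List (List (String × String))))) (token : String) (sex_specific_field_map : List (String × List (String × String))) (sex_value : Option String) : Option (List (String × String)) :=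
  match pyGetDict sex_specific_field_map token with
  | none => first_entry_by_field_key groups token
  | some config =>
    if config.isEmpty then first_entry_by_field_key groups token
    else
      -- preferred_key = config.get(sex_value or "")
      let preferred := pyGetDict config (sex_value.getD "")
      let fk0 : List String := match preferred with
        | some p => if p = "" then [] else [p]
        | none => []
      -- fallback_keys.extend(... for ... in (config.get("female"), config.get("male")) ...)
      let fk1 : List String := match pyGetDict config "female" with
        | some f => if f ≠ "" ∧ f ∉ fk0 then fk0 ++ [f] else fk0
        | none => fk0
      let fk2 : List String := match pyGetDict config "male" with
        | some m => if m ≠ "" ∧ m ∉ fk1 then fk1 ++ [m] else fk1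
        | none => fk1
      pvScanFallback groups config fk2

-- ===== PORT B =====
-- B's inline nested scan for the no-config branch (returns the raw entry, no clone)
def pvFindEntry : List (List (String × List (List (String × String)))) → String → Option (List (String × String))
  | [], _ => none
  | g :: gs, k =>
    match ((pyGetDict g "entries").getD []).find? (fun e => pyGetDict e "field_key" == some k) with
    | some e => some e
    | none => pvFindEntry gs k

-- fk = entry.get("field_key"); keys.index(fk) if fk in keys else None
def pvRank (keys : List String) (e : List (String × String)) : Option Nat :=
  match pyGetDict e "field_key" with
  | some fk => keys.idxOf? fk
  | none => none

-- inner 'for entry in group["entries"]' loop of B's single pass; state = (best_rank, best_entry);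
-- rank 0 breaks immediately (returned state has .1 = 0)
def pvScanEntries (keys : List String) : List (List (String × String)) → Nat → Option (List (String × String)) → Nat × Option (List (String × String))
  | [], br, be => (br, be)
  | e :: es, br, be =>
    match pvRank keys e with
    | some r => if r = 0 then (0, some e) else if r < br then pvScanEntries keys es r (some e) else pvScanEntries keys es br be
    | none => pvScanEntries keys es br be

-- outer 'for group in groups' loop of B's single pass, with the best_rank == 0 break
def pvScanGroups (keys : List String) : List (List (String × List (List (String × String)))) → Nat → Option (List (String × String)) → Nat × Option (List (String × String))
  | [], br, be => (br, be)
  | g :: gs, br, be =>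
    let p := pvScanEntries keys ((pyGetDict g "entries").getD []) br be
    if p.1 = 0 then p else pvScanGroups keys gs p.1 p.2

-- cloned = dict(best_entry); cloned["label"] = config.get("label", best_entry["label"])
def pvCloneLabel (e : List (String × String)) (v : String) : List (String × String) :=
  ((PySem.Dict.mk e).insert "label" v).items

def resolve_sex_specific_entry_alt (groups : List (List (String × List (List (String × String))))) (token : String) (sex_specific_field_map : List (String × List (String × String))) (sex_value : Option String) : Option (List (String × String)) :=
  match pyGetDict sex_specific_field_map token with
  | none => pvFindEntry groups token
  | some config =>
    if config.isEmpty then pvFindEntry groups token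
    else
      let preferred := pyGetDict config (sex_value.getD "")
      let fk0 : List String := match preferred with
        | some p => if p = "" then [] else [p]
        | none => []
      let fk1 : List String := match pyGetDict config "female" with
        | some f => if f ≠ "" ∧ f ∉ fk0 then fk0 ++ [f] else fk0
        | none => fk0
      let fk2 : List String := match pyGetDict config "male" with
        | some m => if m ≠ "" ∧ m ∉ fk1 then fk1 ++ [m] else fk1
        | none => fk1
      if fk2.isEmpty then none
      else
        match (pvScanGroups fk2 groups fk2.length none).2 with
        | some e => some (pvCloneLabel e ((pyGetDict config "label").getD ((pyGetDict e "label").getD "")))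
        | none => none

-- ===== PRECONDITION & SPEC =====
-- Pre_ excludes the input SHAPES on which A can raise KeyError: a group without an "entries"
-- key, and — when token has a non-empty config — an entry whose field_key is one of the
-- config's candidate keys (preferred/female/male) but which has no "label" key
-- (config.get("label", entry["label"]) evaluates entry["label"] eagerly on the matched entry).
-- It is a conservative shape condition: on some excluded inputs A's lazy scan still returns
-- (the malformed item lies after the match) — B returns the IDENTICAL value there (see the
-- claim's cites); Pre_ only over-approximates where A raises, it never hides a disagreement.
def Pre_resolve_sex_specific_entry (groups : List (List (String × List (List (String × String))))) (token : String) (sex_specific_field_map : List (String × List (String × String))) (sex_value : Option String) : Prop :=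
  (groups.all (fun g => ((PySem.Dict.mk g).get? "entries").isSome)) = true ∧
  ((let config := (((PySem.Dict.mk sex_specific_field_map).get? token).getD []);
    config.isEmpty ||
    groups.all (fun g => (((PySem.Dict.mk g).get? "entries").getD []).all
      (fun e =>
        !((PySem.Dict.mk e).get? "field_key" == (PySem.Dict.mk config).get? (sex_value.getD "") &&
            ((PySem.Dict.mk config).get? (sex_value.getD "")).isSome ||
          (PySem.Dict.mk e).get? "field_key" == (PySem.Dict.mk config).get? "female" &&
            ((PySem.Dict.mk config).get? "female").isSome ||
          (PySem.Dict.mk e).get? "field_key" == (PySem.Dict.mk config).get? "male" &&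
            ((PySem.Dict.mk config).get? "male").isSome) ||
        ((PySem.Dict.mk e).get? "label").isSome)))) = true
instance (groups : List (List (String × List (List (String × String))))) (token : String) (sex_specific_field_map : List (String × List (String × String))) (sex_value : Option String) : Decidable (Pre_resolve_sex_specific_entry groups token sex_specific_field_map sex_value) := by unfold Pre_resolve_sex_specific_entry; infer_instance

def pvWitness_resolve_sex_specific_entry : (List (List (String × List (List (String × String))))) × String × (List (String × List (String × String))) × Option String :=
  ([[("entries", [[("field_key", "hb"), ("label", "Hb")]])]], "hb", [], none)

def Spec_resolve_sex_specific_entry (groups : List (List (String × List (List (String × String))))) (token : String) (sex_specific_field_map : List (String × List (String × String))) (sex_value : Option String) (out : Option (List (String × String))) : Prop := out = resolve_sex_specific_entry_alt groups token sex_specific_field_map sex_value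
instance (groups : List (List (String × List (List (String × String))))) (token : String) (sex_specific_field_map : List (String × List (String × String))) (sex_value : Option String) (out : Option (List (String × String))) : Decidable (Spec_resolve_sex_specific_entry groups token sex_specific_field_map sex_value out) := by unfold Spec_resolve_sex_specific_entry; infer_instance

-- ===== CLAIM (what is proved, stated in full; the proofs are below) =====
def Claim_equal_resolve_sex_specific_entry : Prop := ∀ (groups : List (List (String × List (List (String × String))))) (token : String) (sex_specific_field_map : List (String × List (String × String))) (sex_value : Option String), Dom_resolve_sex_specific_entry groups token sex_specific_field_map sex_value → Pre_resolve_sex_specific_entry groups token sex_specific_field_map sex_value → Spec_resolve_sex_specific_entry groups token sex_specific_field_map sex_value (resolve_sex_specific_entry groups token sex_specific_field_map sex_value)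

-- ===== LEMMAS AND PROOFS =====

-- all entries of all groups, in traversal order
def pvFlat (groups : List (List (String × List (List (String × String))))) : List (List (String × String)) :=
  groups.flatMap (fun g => (pyGetDict g "entries").getD [])

lemma pvFirst_eq_flat (groups : List (List (String × List (List (String × String))))) (k : String) :
    first_entry_by_field_key groups k = (pvFlat groups).find? (fun e => pyGetDict e "field_key" == some k) := by
  induction groups with
  | nil => rfl
  | cons g gs ih =>
    simp only [first_entry_by_field_key, pvFlat, List.flatMap_cons, List.find?_append]
    cases hf : ((pyGetDict g "entries").getD []).find? (fun e => pyGetDict e "field_key" == some k) with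
    | some e => simp
    | none => simp [ih, pvFlat]

lemma pvFindEntry_eq (groups : List (List (String × List (List (String × String))))) (k : String) :
    pvFindEntry groups k = first_entry_by_field_key groups k := by
  induction groups with
  | nil => rfl
  | cons g gs ih => simp only [pvFindEntry, first_entry_by_field_key, ih]

lemma pvScanEntries_nil_keys (l : List (List (String × String))) (br : Nat) (be : Option (List (String × String))) :
    pvScanEntries [] l br be = (br, be) := by
  induction l generalizing br be with
  | nil => rfl
  | cons e es ih =>
    simp only [pvScanEntries, pvRank]
    cases pyGetDict e "field_key" with
    | some fk => simp [ih]
    | none => simp [ih]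

lemma pvScanEntries_append (keys : List String) (l1 l2 : List (List (String × String))) (br : Nat) (be : Option (List (String × String))) (h : br ≠ 0) :
    pvScanEntries keys (l1 ++ l2) br be =
      (let p := pvScanEntries keys l1 br be; if p.1 = 0 then p else pvScanEntries keys l2 p.1 p.2) := by
  induction l1 generalizing br be with
  | nil => simp [pvScanEntries, h]
  | cons e es ih =>
    simp only [List.cons_append, pvScanEntries]
    cases pvRank keys e with
    | none => exact ih br be h
    | some r =>
      by_cases hr : r = 0
      · simp [hr]
      · simp only [if_neg hr]
        by_cases hlt : r < br
        · simp only [if_pos hlt]; exact ih r (some e) hr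
        · simp only [if_neg hlt]; exact ih br be h

lemma pvScanGroups_eq_flat (keys : List String) (groups : List (List (String × List (List (String × String))))) (br : Nat) (be : Option (List (String × String))) (h : br ≠ 0) :
    pvScanGroups keys groups br be = pvScanEntries keys (pvFlat groups) br be := by
  induction groups generalizing br be with
  | nil => simp [pvScanGroups, pvFlat, pvScanEntries]
  | cons g gs ih =>
    simp only [pvScanGroups, pvFlat, List.flatMap_cons,
      pvScanEntries_append keys _ _ br be h]
    by_cases h0 : (pvScanEntries keys ((pyGetDict g "entries").getD []) br be).1 = 0
    · simp [h0]
    · simp only [if_neg h0]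
      exact ih _ _ h0

lemma pvIdx_head (k0 : String) (ks : List String) : (k0 :: ks).idxOf? k0 = some 0 := by
  simp [List.idxOf?, List.findIdx?_cons]

lemma pvIdx_zero {fk k0 : String} {ks : List String} (h : (k0 :: ks).idxOf? fk = some 0) : fk = k0 := by
  by_cases hk : k0 = fk
  · exact hk.symm
  · exfalso
    simp [List.idxOf?, List.findIdx?_cons, hk] at h

lemma pvRank_ne_zero {k0 : String} {ks : List String} {e : List (String × String)} {r : Nat}
    (hne : pyGetDict e "field_key" ≠ some k0) (hrk : pvRank (k0 :: ks) e = some r) : r ≠ 0 := by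
  intro hr; subst hr
  unfold pvRank at hrk
  cases hg : pyGetDict e "field_key" with
  | none => simp [hg] at hrk
  | some fk =>
    rw [hg] at hrk
    exact hne (by rw [hg, pvIdx_zero hrk])

lemma pvScanEntries_found (k0 : String) (ks : List String) (l : List (List (String × String))) (e : List (String × String)) (br : Nat) (be : Option (List (String × String)))
    (hf : l.find? (fun e => pyGetDict e "field_key" == some k0) = some e) (h : br ≠ 0) :
    pvScanEntries (k0 :: ks) l br be = (0, some e) := by
  revert h hf
  induction l generalizing br be with
  | nil => intro hf h; simp at hf
  | cons e' es ih =>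
    intro hf h
    by_cases hp : (pyGetDict e' "field_key" == some k0) = true
    · rw [List.find?_cons_of_pos (p := fun e => pyGetDict e "field_key" == some k0) hp] at hf
      obtain rfl : e' = e := by injection hf
      have hfk : pyGetDict e' "field_key" = some k0 := by simpa using hp
      simp [pvScanEntries, pvRank, hfk, pvIdx_head]
    · rw [List.find?_cons_of_neg (p := fun e => pyGetDict e "field_key" == some k0) (by simpa using hp)] at hf
      have hne : pyGetDict e' "field_key" ≠ some k0 := by
        intro hx; simp [hx] at hp
      simp only [pvScanEntries]
      cases hrk : pvRank (k0 :: ks) e' with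
      | none => exact ih br be hf h
      | some r =>
        have hr0 : r ≠ 0 := pvRank_ne_zero hne hrk
        simp only [if_neg hr0]
        by_cases hlt : r < br
        · simp only [if_pos hlt]; exact ih r (some e') hf hr0
        · simp only [if_neg hlt]; exact ih br be hf h

lemma pvScanEntries_frozen (k0 : String) (ks : List String) (l : List (List (String × String))) (be : Option (List (String × String)))
    (hn : ∀ e ∈ l, (pyGetDict e "field_key" == some k0) = false) :
    pvScanEntries (k0 :: ks) l 1 be = (1, be) := by
  revert hn
  induction l generalizing be with
  | nil => intro _; rfl
  | cons e' es ih =>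
    intro hn
    have hne : pyGetDict e' "field_key" ≠ some k0 := by
      intro hx
      have := hn e' (List.mem_cons_self ..)
      simp [hx] at this
    simp only [pvScanEntries]
    cases hrk : pvRank (k0 :: ks) e' with
    | none => exact ih be fun e he => hn e (List.mem_cons_of_mem _ he)
    | some r =>
      have hr0 : r ≠ 0 := pvRank_ne_zero hne hrk
      have hnl : ¬ r < 1 := by omega
      simp only [if_neg hr0, if_neg hnl]
      exact ih be fun e he => hn e (List.mem_cons_of_mem _ he)

lemma pvScanEntries_shift (k0 : String) (ks : List String) (l : List (List (String × String))) (br : Nat) (be : Option (List (String × String)))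
    (hn : ∀ e ∈ l, (pyGetDict e "field_key" == some k0) = false) (h : br ≠ 0) :
    pvScanEntries (k0 :: ks) l (br + 1) be =
      ((pvScanEntries ks l br be).1 + 1, (pvScanEntries ks l br be).2) := by
  revert h hn
  induction l generalizing br be with
  | nil => intro _ _; rfl
  | cons e' es ih =>
    intro hn h
    have hne : pyGetDict e' "field_key" ≠ some k0 := by
      intro hx
      have := hn e' (List.mem_cons_self ..)
      simp [hx] at this
    have htail : ∀ e ∈ es, (pyGetDict e "field_key" == some k0) = false :=
      fun e he => hn e (List.mem_cons_of_mem _ he)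
    simp only [pvScanEntries]
    cases hg : pyGetDict e' "field_key" with
    | none =>
      have h1 : pvRank (k0 :: ks) e' = none := by simp [pvRank, hg]
      have h2 : pvRank ks e' = none := by simp [pvRank, hg]
      rw [h1, h2]
      exact ih br be htail h
    | some fk =>
      have hfk : fk ≠ k0 := by intro hx; exact hne (by rw [hg, hx])
      have h1 : pvRank (k0 :: ks) e' = (ks.idxOf? fk).map (· + 1) := by
        simp [pvRank, hg, List.idxOf?, List.findIdx?_cons, hfk.symm]
      cases hk : ks.idxOf? fk with
      | none =>
        have h2 : pvRank ks e' = none := by simp [pvRank, hg, hk]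
        rw [h1, hk, h2]
        exact ih br be htail h
      | some r =>
        have h2 : pvRank ks e' = some r := by simp [pvRank, hg, hk]
        rw [h1, hk, h2]
        simp only [Option.map_some]
        by_cases hr : r = 0
        · subst hr
          have hlt : 1 < br + 1 := by omega
          simp only [if_neg (by omega : ¬ (0 + 1 = 0)), if_pos hlt]
          rw [pvScanEntries_frozen k0 ks es (some e') htail]
          simp
        · have hr1 : r + 1 ≠ 0 := by omega
          simp only [if_neg hr, if_neg hr1]
          by_cases hlt : r < br
          · simp only [if_pos hlt, if_pos (by omega : r + 1 < br + 1)]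
            exact ih r (some e') htail hr
          · simp only [if_neg hlt, if_neg (by omega : ¬ (r + 1 < br + 1))]
            exact ih br be htail h

lemma pvMatched_nonempty (e : List (String × String)) (k : String) (h : (pyGetDict e "field_key" == some k) = true) :
    e.isEmpty = false := by
  cases e with
  | nil =>
    exfalso
    have : pyGetDict ([] : List (String × String)) "field_key" = none := rfl
    rw [this] at h
    simp at h
  | cons p ps => rfl

lemma pvCore (groups : List (List (String × List (List (String × String))))) (config : List (String × String)) (ks : List String) :
    pvScanFallback groups config ks =
      (match (pvScanEntries ks (pvFlat groups) ks.length none).2 with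
       | some e => some (pvCloneLabel e ((pyGetDict config "label").getD ((pyGetDict e "label").getD "")))
       | none => none) := by
  induction ks with
  | nil => simp [pvScanFallback, pvScanEntries_nil_keys]
  | cons k0 ks ih =>
    simp only [pvScanFallback, pvFirst_eq_flat]
    cases hf : (pvFlat groups).find? (fun e => pyGetDict e "field_key" == some k0) with
    | some e =>
      have hp : (pyGetDict e "field_key" == some k0) = true := by
        have := List.find?_some hf
        simpa using this
      have hlen : (k0 :: ks).length ≠ 0 := by simp
      rw [pvScanEntries_found k0 ks _ e _ none hf hlen]
      simp [pvMatched_nonempty e k0 hp, pvCloneLabel, clone_entry_label]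
    | none =>
      have hn : ∀ e ∈ pvFlat groups, (pyGetDict e "field_key" == some k0) = false := by
        intro e he
        have := List.find?_eq_none.mp hf e he
        simpa using this
      rw [ih]
      cases ks with
      | nil =>
        simp only [List.length_cons, List.length_nil, Nat.zero_add]
        rw [pvScanEntries_frozen k0 [] _ none hn]
        simp [pvScanEntries_nil_keys]
      | cons k1 ks' =>
        have hlen : (k1 :: ks').length ≠ 0 := by simp
        have := pvScanEntries_shift k0 (k1 :: ks') (pvFlat groups) (k1 :: ks').length none hn hlen
        simp only [List.length_cons] at this ⊢
        rw [this]

lemma pvMain (groups : List (List (String × List (List (String × String))))) (config : List (String × String)) (ks : List String) :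
    pvScanFallback groups config ks =
      (if ks.isEmpty then none else
       match (pvScanGroups ks groups ks.length none).2 with
       | some e => some (pvCloneLabel e ((pyGetDict config "label").getD ((pyGetDict e "label").getD "")))
       | none => none) := by
  by_cases hks : ks.isEmpty
  · obtain rfl : ks = [] := List.isEmpty_iff.mp hks
    simp [pvScanFallback]
  · have hlen : ks.length ≠ 0 := by
      intro h0
      exact hks (List.isEmpty_iff.mpr (List.length_eq_zero_iff.mp h0))
    rw [if_neg (by simpa using hks), pvScanGroups_eq_flat ks groups ks.length none hlen]
    exact pvCore groups config ks

-- ===== VERDICT (by name: the statement is the Claim_ definition above) =====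
theorem resolve_sex_specific_entry_spec : Claim_equal_resolve_sex_specific_entry := by
  intro groups token m sex _ _
  unfold Spec_resolve_sex_specific_entry resolve_sex_specific_entry resolve_sex_specific_entry_alt
  cases h : pyGetDict m token with
  | none => simp [pvFindEntry_eq]
  | some config =>
    by_cases hc : config.isEmpty
    · simp [hc, pvFindEntry_eq]
    · simp only [hc]
      exact pvMain groups config _
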